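-- pv_equiv track=rewrite | github.com/hi9900/algorithm | 알고리즘문제해결전략/07_QUADTREE.py | solve
-- ===== SOURCE A (Python) =====
-- def solve(s, idx):
--     # 문자열을 모두 순회
--     if idx == len(s):
--         return ""
--
--     c = s[idx]
--     if c == 'b':
--         return 'b'
--     if c == 'w':
--         return 'w'
--
--     # x이면, 내부 트리를 상하 반전 후 반환
--     idx += 1
--     lt = solve(s, idx)
--     idx += len(lt)
--     rt = solve(s, idx)
--     idx += len(rt)
--     lb = solve(s, idx)
--     idx += len(lb)
--     rb = solve(s, idx)
--     return f'x{lb}{rb}{lt}{rt}'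
-- ===== SOURCE B (Python) =====
-- # Two-phase rewrite: parse one node into an explicit tree, then serialize it
-- # with the top and bottom quadrant pairs swapped.
--
-- def parse(s, i):
--     """Parse one node starting at position i; return (tree, consumed_chars)."""
--     if i == len(s):
--         return ('e',), 0
--     c = s[i]
--     if c == 'b' or c == 'w':
--         return ('l', c), 1
--     lt, n1 = parse(s, i + 1)
--     rt, n2 = parse(s, i + 1 + n1)
--     lb, n3 = parse(s, i + 1 + n1 + n2)
--     rb, n4 = parse(s, i + 1 + n1 + n2 + n3)
--     return ('n', lt, rt, lb, rb), 1 + n1 + n2 + n3 + n4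
--
-- def flipped(t):
--     """Serialize a tree, swapping the top and bottom rows of every node."""
--     if t[0] == 'e':
--         return ''
--     if t[0] == 'l':
--         return t[1]
--     _, lt, rt, lb, rb = t
--     return 'x' + flipped(lb) + flipped(rb) + flipped(lt) + flipped(rt)
--
-- def solve(s, idx):
--     if idx == len(s):
--         return ""
--     return flipped(parse(s, idx)[0])
-- ===== Notes on version B (the rewrite author's own statement) =====
-- stated objective: alternative
-- what changed: A flips the quadtree in one recursive pass that rebuilds strings while tracking indices; B separates the work into a parser that builds an explicit tree (returning consumed length) and a serializer that emits the tree with the top/bottom quadrant pairs swapped.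
import Mathlib
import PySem

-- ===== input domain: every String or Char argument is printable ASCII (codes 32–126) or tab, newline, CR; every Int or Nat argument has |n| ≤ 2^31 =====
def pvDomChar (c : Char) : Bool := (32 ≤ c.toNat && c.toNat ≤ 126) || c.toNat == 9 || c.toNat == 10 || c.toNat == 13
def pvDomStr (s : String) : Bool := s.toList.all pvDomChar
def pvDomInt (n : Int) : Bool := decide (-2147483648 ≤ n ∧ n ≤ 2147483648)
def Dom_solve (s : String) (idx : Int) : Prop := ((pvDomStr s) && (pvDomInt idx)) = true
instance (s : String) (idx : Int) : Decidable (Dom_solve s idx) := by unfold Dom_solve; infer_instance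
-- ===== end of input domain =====

-- B re-implements A's single-pass flip as parse-to-explicit-tree then flipped serialization (objective: alternative decomposition, same cost).
-- Both ports carry a fuel argument only to make the recursion structural; fuel 2*len(s)+1 is never exhausted on admitted inputs.

-- ===== PORT A =====
def solveAux (s : List Char) : Nat → Int → List Char
  | 0, _ => []                                       -- fuel exhausted: unreachable from solve's initial fuel
  | fuel + 1, idx =>
    if idx = (s.length : Int) then []
    else if (s.length : Int) < idx then []           -- Python raises IndexError here; excluded by Pre_solve
    else
      match PySem.List.pyGet? s idx with
      | none => []                                   -- idx < -len(s): Python raises IndexError; excluded by Pre_solve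
      | some c =>
        if c = 'b' then ['b']
        else if c = 'w' then ['w']
        else
          let lt := solveAux s fuel (idx + 1)
          let rt := solveAux s fuel (idx + 1 + lt.length)
          let lb := solveAux s fuel (idx + 1 + lt.length + rt.length)
          let rb := solveAux s fuel (idx + 1 + lt.length + rt.length + lb.length)
          'x' :: (lb ++ rb ++ lt ++ rt)

def solve (s : String) (idx : Int) : String :=
  String.ofList (solveAux s.toList (2 * s.toList.length + 1) idx)

-- ===== PORT B =====
inductive Qt
  | emp : Qt
  | leaf : Char → Qt
  | node : Qt → Qt → Qt → Qt → Qt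
deriving DecidableEq, Repr

-- parse one node starting at i; returns (tree, consumed character count)
def parseAux (s : List Char) : Nat → Int → Qt × Nat
  | 0, _ => (Qt.emp, 0)                              -- fuel exhausted: unreachable from solve_alt's initial fuel
  | fuel + 1, i =>
    if i = (s.length : Int) then (Qt.emp, 0)
    else if (s.length : Int) < i then (Qt.emp, 0)    -- Python raises IndexError here; excluded by Pre_solve
    else
      match PySem.List.pyGet? s i with
      | none => (Qt.emp, 0)                          -- i < -len(s): Python raises IndexError; excluded by Pre_solve
      | some c =>
        if c = 'b' ∨ c = 'w' then (Qt.leaf c, 1)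
        else
          let p1 := parseAux s fuel (i + 1)
          let p2 := parseAux s fuel (i + 1 + p1.2)
          let p3 := parseAux s fuel (i + 1 + p1.2 + p2.2)
          let p4 := parseAux s fuel (i + 1 + p1.2 + p2.2 + p3.2)
          (Qt.node p1.1 p2.1 p3.1 p4.1, 1 + p1.2 + p2.2 + p3.2 + p4.2)

-- serialize with the top and bottom quadrant pairs swapped
def flipped : Qt → List Char
  | .emp => []
  | .leaf c => [c]
  | .node lt rt lb rb => 'x' :: (flipped lb ++ flipped rb ++ flipped lt ++ flipped rt)

def solve_alt (s : String) (idx : Int) : String :=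
  if idx = (s.toList.length : Int) then ""
  else String.ofList (flipped (parseAux s.toList (2 * s.toList.length + 1) idx).1)

-- ===== PRECONDITION & SPEC =====
-- Pre_solve admits exactly the inputs on which Python A returns (elsewhere s[idx] raises IndexError somewhere in the recursion).
def Pre_solve (s : String) (idx : Int) : Prop :=
  -(s.toList.length : Int) ≤ idx ∧ idx ≤ (s.toList.length : Int)
instance (s : String) (idx : Int) : Decidable (Pre_solve s idx) := by unfold Pre_solve; infer_instance

def pvWitness_solve : String × Int := ("xbwwb", 0)

def Spec_solve (s : String) (idx : Int) (out : String) : Prop := out = solve_alt s idx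
instance (s : String) (idx : Int) (out : String) : Decidable (Spec_solve s idx out) := by unfold Spec_solve; infer_instance

-- ===== CLAIM (what is proved, stated in full; the proofs are below) =====
def Claim_equal_solve : Prop := ∀ (s : String) (idx : Int), Dom_solve s idx → Pre_solve s idx → Spec_solve s idx (solve s idx)

-- ===== LEMMAS AND PROOFS =====

-- joint invariant, at every fuel: the flipped serialization of the parsed tree is A's output,
-- and the consumed count is that output's length (so both recursions visit the same indices)
theorem parse_solve (s : List Char) :
    ∀ (fuel : Nat) (i : Int),
      flipped (parseAux s fuel i).1 = solveAux s fuel i ∧ (parseAux s fuel i).2 = (solveAux s fuel i).length := by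
  intro fuel
  induction fuel with
  | zero => intro i; simp [parseAux, solveAux, flipped]
  | succ n ih =>
    intro i
    rw [parseAux, solveAux]
    by_cases hi : i = (s.length : Int)
    · simp [hi, flipped]
    · by_cases hgt : (s.length : Int) < i
      · simp [hi, hgt, flipped]
      · simp only [hi, hgt, if_false]
        cases hc : PySem.List.pyGet? s i with
        | none => simp [flipped]
        | some c =>
          by_cases hb : c = 'b'
          · simp [hb, flipped]
          · by_cases hw : c = 'w'
            · simp [hw, flipped]
            · simp only [hb, hw, or_self, if_false]
              simp only [flipped]
              have h1 := ih (i + 1)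
              rw [h1.2, h1.1]
              have h2 := ih (i + 1 + ((solveAux s n (i + 1)).length : Int))
              rw [h2.2, h2.1]
              have h3 := ih (i + 1 + ((solveAux s n (i + 1)).length : Int)
                + ((solveAux s n (i + 1 + ((solveAux s n (i + 1)).length : Int))).length : Int))
              rw [h3.2, h3.1]
              have h4 := ih (i + 1 + ((solveAux s n (i + 1)).length : Int)
                + ((solveAux s n (i + 1 + ((solveAux s n (i + 1)).length : Int))).length : Int)
                + ((solveAux s n (i + 1 + ((solveAux s n (i + 1)).length : Int)
                    + ((solveAux s n (i + 1 + ((solveAux s n (i + 1)).length : Int))).length : Int))).length : Int))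
              rw [h4.2, h4.1]
              constructor
              · rfl
              · simp [List.length_append]
                omega

-- ===== VERDICT (by name: the statement is the Claim_ definition above) =====
theorem solve_spec : Claim_equal_solve := by
  intro s idx _ _
  unfold Spec_solve solve solve_alt
  have h := (parse_solve s.toList (2 * s.toList.length + 1) idx).1
  by_cases hi : idx = (s.toList.length : Int)
  · rw [if_pos hi]
    rw [solveAux, if_pos hi]
  · rw [if_neg hi, h]
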